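-- pv_equiv track=rewrite | github.com/deploifai/examples | SafeTweet/test.py | filter_special_char
-- ===== SOURCE A (Python) =====
-- def filter_special_char(a):
--     sent = []
--     for word in a.split(' '):
--         if ('$' in word) | ('&' in word):
--             sent.append('')
--         else:
--             sent.append(word)
--     return ' '.join(sent)
-- ===== SOURCE B (Python) =====
-- def filter_special_char(a):
--     # single pass over the characters: build the output directly, tracking the
--     # current word and whether it contains a special character
--     res = []
--     cur = []
--     bad = False
--     for ch in a:
--         if ch == ' ':
--             if not bad:
--                 res += cur
--             res.append(' ')
--             cur = []
--             bad = False
--         else: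
--             cur.append(ch)
--             if ch == '$' or ch == '&':
--                 bad = True
--     if not bad:
--         res += cur
--     return ''.join(res)
-- ===== Notes on version B (the rewrite author's own statement) =====
-- stated objective: alternative
-- what changed: Replaced the split/append-loop/join over a token list by a single character-level pass with a current-word-and-bad-flag state machine that writes the output directly.
import Mathlib
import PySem

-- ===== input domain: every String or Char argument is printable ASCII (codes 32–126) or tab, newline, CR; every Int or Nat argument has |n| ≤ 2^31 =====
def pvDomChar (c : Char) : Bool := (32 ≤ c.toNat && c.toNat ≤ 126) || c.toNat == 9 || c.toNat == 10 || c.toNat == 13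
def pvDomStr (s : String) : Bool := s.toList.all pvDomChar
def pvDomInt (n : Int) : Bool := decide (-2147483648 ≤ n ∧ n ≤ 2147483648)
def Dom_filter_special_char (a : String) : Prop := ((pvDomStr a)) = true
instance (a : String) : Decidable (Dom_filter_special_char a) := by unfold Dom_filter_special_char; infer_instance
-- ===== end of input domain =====

-- B replaces A's split(' ')/loop/join over a token list by a single character-level pass
-- with a (current word, bad flag) state machine that writes the output directly.

-- ===== PORT A =====
def filter_special_char (a : String) : String :=
  let sent := (PySem.Chars.splitOn a.toList [' ']).foldl
    (fun sent word =>
      if (PySem.Chars.isIn ['$'] word || PySem.Chars.isIn ['&'] word)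
      then sent ++ [([] : List Char)]
      else sent ++ [word]) []
  String.ofList (PySem.Chars.join [' '] sent)

-- ===== PORT B =====
def filter_special_char_alt (a : String) : String :=
  let st := a.toList.foldl
    (fun (st : List Char × List Char × Bool) c =>
      if c = ' ' then
        ((if st.2.2 then st.1 else st.1 ++ st.2.1) ++ [' '], ([], false))
      else
        (st.1, (st.2.1 ++ [c], st.2.2 || c == '$' || c == '&')))
    ([], ([], false))
  String.ofList (if st.2.2 then st.1 else st.1 ++ st.2.1)

-- ===== PRECONDITION & SPEC =====
def Spec_filter_special_char (a : String) (out : String) : Prop := out = filter_special_char_alt a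
instance (a : String) (out : String) : Decidable (Spec_filter_special_char a out) := by unfold Spec_filter_special_char; infer_instance

-- ===== CLAIM (what is proved, stated in full; the proofs are below) =====
def Claim_equal_filter_special_char : Prop := ∀ (a : String), Dom_filter_special_char a → Spec_filter_special_char a (filter_special_char a)

-- ===== LEMMAS AND PROOFS =====

-- split on a single space, as (first word, remaining words)
def splitSp : List Char → List Char × List (List Char)
  | [] => ([], [])
  | c :: cs =>
    let p := splitSp cs
    if c = ' ' then ([], p.1 :: p.2) else (c :: p.1, p.2)

-- A's per-word replacement
def gw (w : List Char) : List Char :=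
  if w.any (fun c => c == '$' || c == '&') then [] else w

-- the joined tail: a space before each remaining (filtered) word
def tailJoin (rs : List (List Char)) : List Char :=
  (rs.map (fun v => ' ' :: gw v)).flatten

-- B's loop as structural recursion on the remaining characters
def bspec : List Char → List Char → Bool → List Char
  | [], cur, bad => if bad then [] else cur
  | c :: cs, cur, bad =>
    if c = ' ' then (if bad then [] else cur) ++ ' ' :: bspec cs [] false
    else bspec cs (cur ++ [c]) (bad || c == '$' || c == '&')

lemma isIn_singleton (x : Char) (w : List Char) :
    PySem.Chars.isIn [x] w = w.contains x := by
  by_cases h : x ∈ w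
  · have hi : [x] <:+: w := by
      obtain ⟨s, t, rfl⟩ := List.append_of_mem h; exact ⟨s, t, by simp⟩
    have h1 : PySem.Chars.isIn [x] w = true := by
      rw [PySem.Chars.isIn_iff_infix]; exact hi
    simp [h1, h]
  · have hi : ¬ [x] <:+: w := fun hi => h (hi.mem (by simp))
    have h1 : PySem.Chars.isIn [x] w = false := by
      rw [PySem.Chars.isIn_eq_false_iff]; exact hi
    simp [h1, h]

lemma any_or_split (w : List Char) :
    w.any (fun c => c == '$' || c == '&') = (w.contains '$' || w.contains '&') := by
  induction w with
  | nil => simp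
  | cons c w ih =>
    simp only [List.any_cons, List.contains_cons, ih]
    by_cases h1 : c = '$'
    · simp [h1]
    · by_cases h2 : c = '&'
      · simp [h2]
      · have e1 : ('$' == c) = false := beq_eq_false_iff_ne.mpr (fun h => h1 h.symm)
        have e2 : ('&' == c) = false := beq_eq_false_iff_ne.mpr (fun h => h2 h.symm)
        have e3 : (c == '$') = false := beq_eq_false_iff_ne.mpr h1
        have e4 : (c == '&') = false := beq_eq_false_iff_ne.mpr h2
        simp [e1, e2, e3, e4]

lemma gw_eq (w : List Char) :
    (if (PySem.Chars.isIn ['$'] w || PySem.Chars.isIn ['&'] w) then ([] : List Char) else w)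
      = gw w := by
  rw [gw, isIn_singleton, isIn_singleton, any_or_split]

lemma splitOn_go_eq (l : List Char) : ∀ (fuel : Nat) (cur : List Char) (acc : List (List Char)),
    l.length < fuel →
    PySem.Chars.splitOn.go [' '] fuel l cur acc
      = acc.reverse ++ (cur.reverse ++ (splitSp l).1) :: (splitSp l).2 := by
  induction l with
  | nil =>
    intro fuel cur acc h
    obtain ⟨f, rfl⟩ : ∃ f, fuel = f + 1 := ⟨fuel - 1, by omega⟩
    simp [PySem.Chars.splitOn.go, splitSp]
  | cons c cs ih =>
    intro fuel cur acc h
    obtain ⟨f, rfl⟩ : ∃ f, fuel = f + 1 := ⟨fuel - 1, by omega⟩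
    by_cases hc : c = ' '
    · subst hc
      simp only [PySem.Chars.splitOn.go, List.isPrefixOf_cons₂]
      simp [ih f _ _ (by simpa using Nat.lt_of_succ_lt_succ h), splitSp]
    · have hp : ([' '].isPrefixOf (c :: cs)) = false := by
        simp [List.isPrefixOf_cons₂]; exact fun hh => hc hh.symm
      simp only [PySem.Chars.splitOn.go, hp]
      simp [ih f _ _ (by simpa using Nat.lt_of_succ_lt_succ h), splitSp, hc]

lemma splitOn_eq_splitSp (cs : List Char) :
    PySem.Chars.splitOn cs [' '] = (splitSp cs).1 :: (splitSp cs).2 := by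
  rw [PySem.Chars.splitOn, splitOn_go_eq cs (cs.length + 1) [] [] (by omega)]
  simp

lemma foldl_filter_eq_map (parts : List (List Char)) : ∀ (acc : List (List Char)),
    parts.foldl
      (fun sent word =>
        if (PySem.Chars.isIn ['$'] word || PySem.Chars.isIn ['&'] word)
        then sent ++ [([] : List Char)]
        else sent ++ [word]) acc
      = acc ++ parts.map gw := by
  induction parts with
  | nil => simp
  | cons w ps ih =>
    intro acc
    rw [List.foldl_cons]
    by_cases hw : (PySem.Chars.isIn ['$'] w || PySem.Chars.isIn ['&'] w) = true
    · rw [if_pos hw, ih, List.map_cons]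
      have hgw : gw w = [] := by rw [← gw_eq, if_pos hw]
      simp [hgw]
    · have hw' := eq_false_of_ne_true hw
      rw [if_neg (by simp [hw']), ih, List.map_cons]
      have hgw : gw w = w := by rw [← gw_eq, hw']; simp
      simp [hgw]

lemma join_map_gw (w : List Char) (rs : List (List Char)) :
    PySem.Chars.join [' '] ((w :: rs).map gw) = gw w ++ tailJoin rs := by
  induction rs generalizing w with
  | nil => simp [PySem.Chars.join_singleton, tailJoin]
  | cons v vs ih =>
    simp only [List.map_cons] at ih ⊢
    rw [PySem.Chars.join_cons_cons, ih v]
    simp [tailJoin]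

lemma bloop_eq (cs : List Char) : ∀ (res cur : List Char) (bad : Bool),
    (if (cs.foldl
        (fun (st : List Char × List Char × Bool) c =>
          if c = ' ' then
            ((if st.2.2 then st.1 else st.1 ++ st.2.1) ++ [' '], ([], false))
          else
            (st.1, (st.2.1 ++ [c], st.2.2 || c == '$' || c == '&')))
        (res, (cur, bad))).2.2 = true
     then (cs.foldl
        (fun (st : List Char × List Char × Bool) c =>
          if c = ' ' then
            ((if st.2.2 then st.1 else st.1 ++ st.2.1) ++ [' '], ([], false))
          else
            (st.1, (st.2.1 ++ [c], st.2.2 || c == '$' || c == '&')))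
        (res, (cur, bad))).1
     else (cs.foldl
        (fun (st : List Char × List Char × Bool) c =>
          if c = ' ' then
            ((if st.2.2 then st.1 else st.1 ++ st.2.1) ++ [' '], ([], false))
          else
            (st.1, (st.2.1 ++ [c], st.2.2 || c == '$' || c == '&')))
        (res, (cur, bad))).1 ++ (cs.foldl
        (fun (st : List Char × List Char × Bool) c =>
          if c = ' ' then
            ((if st.2.2 then st.1 else st.1 ++ st.2.1) ++ [' '], ([], false))
          else
            (st.1, (st.2.1 ++ [c], st.2.2 || c == '$' || c == '&')))
        (res, (cur, bad))).2.1)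
    = res ++ bspec cs cur bad := by
  induction cs with
  | nil => intro res cur bad; cases bad <;> simp [bspec]
  | cons c cs ih =>
    intro res cur bad
    simp only [List.foldl_cons]
    by_cases hc : c = ' '
    · rw [if_pos hc, ih, hc, bspec, if_pos rfl]
      cases bad <;> simp [List.append_assoc]
    · rw [if_neg hc, ih, bspec, if_neg hc]

lemma bspec_eq (cs : List Char) : ∀ (cur : List Char) (bad : Bool),
    bspec cs cur bad
    = (if (bad || (splitSp cs).1.any (fun c => c == '$' || c == '&')) then []
       else cur ++ (splitSp cs).1) ++ tailJoin (splitSp cs).2 := by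
  induction cs with
  | nil => intro cur bad; cases bad <;> simp [bspec, splitSp, tailJoin]
  | cons c cs ih =>
    intro cur bad
    by_cases hc : c = ' '
    · subst hc
      rw [bspec, if_pos rfl, ih [] false]
      simp only [splitSp, Bool.false_or, List.nil_append]
      have hg : (if ((splitSp cs).1.any fun c => c == '$' || c == '&') = true
          then ([] : List Char) else (splitSp cs).1) = gw (splitSp cs).1 := rfl
      rw [hg]
      cases bad <;> simp [tailJoin]
    · rw [bspec, if_neg hc, ih]
      have hs : splitSp (c :: cs) = (c :: (splitSp cs).1, (splitSp cs).2) := by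
        simp [splitSp, hc]
      rw [hs]
      simp [List.any_cons, Bool.or_assoc, List.append_assoc]

lemma ports_eq (cs : List Char) :
    String.ofList (PySem.Chars.join [' ']
      ((PySem.Chars.splitOn cs [' ']).foldl
        (fun sent word =>
          if (PySem.Chars.isIn ['$'] word || PySem.Chars.isIn ['&'] word)
          then sent ++ [([] : List Char)]
          else sent ++ [word]) []))
    = String.ofList
        (if (cs.foldl
        (fun (st : List Char × List Char × Bool) c =>
          if c = ' ' then
            ((if st.2.2 then st.1 else st.1 ++ st.2.1) ++ [' '], ([], false))
          else
            (st.1, (st.2.1 ++ [c], st.2.2 || c == '$' || c == '&')))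
        ([], ([], false))).2.2 then (cs.foldl
        (fun (st : List Char × List Char × Bool) c =>
          if c = ' ' then
            ((if st.2.2 then st.1 else st.1 ++ st.2.1) ++ [' '], ([], false))
          else
            (st.1, (st.2.1 ++ [c], st.2.2 || c == '$' || c == '&')))
        ([], ([], false))).1 else (cs.foldl
        (fun (st : List Char × List Char × Bool) c =>
          if c = ' ' then
            ((if st.2.2 then st.1 else st.1 ++ st.2.1) ++ [' '], ([], false))
          else
            (st.1, (st.2.1 ++ [c], st.2.2 || c == '$' || c == '&')))
        ([], ([], false))).1 ++ (cs.foldl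
        (fun (st : List Char × List Char × Bool) c =>
          if c = ' ' then
            ((if st.2.2 then st.1 else st.1 ++ st.2.1) ++ [' '], ([], false))
          else
            (st.1, (st.2.1 ++ [c], st.2.2 || c == '$' || c == '&')))
        ([], ([], false))).2.1) := by
  rw [splitOn_eq_splitSp, foldl_filter_eq_map, List.nil_append, join_map_gw,
    bloop_eq cs [] [] false, List.nil_append, bspec_eq cs [] false]
  simp only [Bool.false_or, List.nil_append, gw]

-- ===== VERDICT (by name: the statement is the Claim_ definition above) =====
theorem filter_special_char_spec : Claim_equal_filter_special_char := by
  intro a _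
  exact ports_eq a.toList
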